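-- pv_equiv track=rewrite | github.com/sameersegal/House-Designer | src/goa_house/render/massing.py | _split_at_seam
-- ===== SOURCE A (Python) =====
-- def _split_at_seam(pts, width):
--     threshold = width // 2
--     segments: list[list[tuple[int, int]]] = []
--     current: list[tuple[int, int]] = []
--     for p in pts:
--         if not current:
--             current.append(p)
--             continue
--         prev = current[-1]
--         if abs(p[0] - prev[0]) > threshold:
--             segments.append(current)
--             current = [p]
--         else:
--             current.append(p)
--     if current:
--         segments.append(current)
--     return segments
-- ===== SOURCE B (Python) =====
-- def _split_at_seam(pts, width):
--     pts = list(pts)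
--     if not pts:
--         return []
--     half = width // 2
--     breaks = [i + 1 for i, (p, q) in enumerate(zip(pts, pts[1:]))
--               if abs(q[0] - p[0]) > half]
--     bounds = [0] + breaks + [len(pts)]
--     return [pts[a:b] for a, b in zip(bounds, bounds[1:])]
-- ===== Notes on version B (the rewrite author's own statement) =====
-- stated objective: alternative
-- what changed: B replaces A's fused single-pass accumulator loop by a two-phase decomposition: first compute the break indices by scanning adjacent pairs, then slice the list at the boundary positions; A's running 'current' segment and final flush disappear.
import Mathlib
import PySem

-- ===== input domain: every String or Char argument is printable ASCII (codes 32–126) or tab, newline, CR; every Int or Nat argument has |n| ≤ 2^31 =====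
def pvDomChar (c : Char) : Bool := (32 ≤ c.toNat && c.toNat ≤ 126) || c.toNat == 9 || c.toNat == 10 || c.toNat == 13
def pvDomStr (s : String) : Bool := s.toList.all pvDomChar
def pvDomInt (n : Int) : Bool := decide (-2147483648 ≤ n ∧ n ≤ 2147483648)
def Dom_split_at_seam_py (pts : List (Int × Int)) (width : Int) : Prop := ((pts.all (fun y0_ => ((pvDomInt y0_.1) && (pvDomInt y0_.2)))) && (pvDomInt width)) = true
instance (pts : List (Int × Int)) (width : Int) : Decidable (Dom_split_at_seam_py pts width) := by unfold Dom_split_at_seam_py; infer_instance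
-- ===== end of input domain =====

-- B computes the break indices first and then slices the list at those boundaries
-- (two staged passes instead of A's fused accumulator loop); same O(n) cost.

-- ===== PORT A =====
-- the loop 'for p in pts' of A, with state (segments, current); 'current[-1]' is getLast?
def pvLoopA (t : Int) (segs : List (List (Int × Int))) (cur : List (Int × Int)) :
    List (Int × Int) → List (List (Int × Int))
  | [] => if cur = [] then segs else segs ++ [cur]      -- 'if current: segments.append(current)'
  | p :: ps =>
    if cur = [] then pvLoopA t segs (cur ++ [p]) ps     -- 'current.append(p); continue'
    else
      match cur.getLast? with
      | some prev =>
        if |p.1 - prev.1| > t then pvLoopA t (segs ++ [cur]) [p] ps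
        else pvLoopA t segs (cur ++ [p]) ps
      | none => segs                                    -- unreachable: cur ≠ []

def split_at_seam_py (pts : List (Int × Int)) (width : Int) : List (List (Int × Int)) :=
  pvLoopA (PySem.Int.floordiv width 2) [] [] pts        -- threshold = width // 2

-- ===== PORT B =====
def split_at_seam_py_alt (pts : List (Int × Int)) (width : Int) : List (List (Int × Int)) :=
  if pts = [] then []                                   -- 'if not pts: return []'
  else
    let half := PySem.Int.floordiv width 2              -- half = width // 2
    -- breaks = [i+1 for i, (p, q) in enumerate(zip(pts, pts[1:])) if abs(q[0]-p[0]) > half]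
    let breaks :=
      (PySem.List.enumerate (pts.zip (PySem.List.slice pts (some 1) none))).filterMap
        (fun ipq => if |ipq.2.2.1 - ipq.2.1.1| > half then some (ipq.1 + 1) else none)
    let bounds := [(0 : Int)] ++ breaks ++ [(pts.length : Int)]   -- [0] + breaks + [len(pts)]
    -- [pts[a:b] for a, b in zip(bounds, bounds[1:])]
    (bounds.zip (PySem.List.slice bounds (some 1) none)).map
      (fun ab => PySem.List.slice pts (some ab.1) (some ab.2))

-- ===== PRECONDITION & SPEC =====
def Spec_split_at_seam_py (pts : List (Int × Int)) (width : Int) (out : List (List (Int × Int))) : Prop := out = split_at_seam_py_alt pts width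
instance (pts : List (Int × Int)) (width : Int) (out : List (List (Int × Int))) : Decidable (Spec_split_at_seam_py pts width out) := by unfold Spec_split_at_seam_py; infer_instance

-- ===== CLAIM (what is proved, stated in full; the proofs are below) =====
def Claim_equal_split_at_seam_py : Prop := ∀ (pts : List (Int × Int)) (width : Int), Dom_split_at_seam_py pts width → Spec_split_at_seam_py pts width (split_at_seam_py pts width)

-- ===== LEMMAS AND PROOFS =====

-- canonical structural recursion both ports are reduced to
def pvChop (t : Int) : List (Int × Int) → List (List (Int × Int))
  | [] => []
  | p :: ps =>
    match pvChop t ps with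
    | (q :: seg) :: rest =>
      if |p.1 - q.1| ≤ t then (p :: q :: seg) :: rest else [p] :: (q :: seg) :: rest
    | r => [p] :: r

-- every pvChop result on a nonempty list is nonempty and its first segment starts with the head
theorem pvChop_cons (t : Int) (p : Int × Int) (ps : List (Int × Int)) :
    ∃ s r, pvChop t (p :: ps) = (p :: s) :: r := by
  rw [pvChop]
  rcases h : pvChop t ps with _ | ⟨_ | ⟨q, seg⟩, rest⟩
  · exact ⟨[], [], rfl⟩
  · exact ⟨[], [] :: rest, rfl⟩
  · by_cases hc : |p.1 - q.1| ≤ t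
    · exact ⟨q :: seg, rest, by simp [hc]⟩
    · exact ⟨[], (q :: seg) :: rest, by simp [hc]⟩

-- A's loop, with a nonempty current segment ending in prev, produces segs ++ pvChop
-- of the unprocessed points with prev glued in front, the first chunk extended by cur.
theorem pvLoopA_chop (t : Int) (ps : List (Int × Int)) :
    ∀ (segs : List (List (Int × Int))) (cur : List (Int × Int)) (prev : Int × Int)
      (s : List (Int × Int)) (r : List (List (Int × Int))),
      pvChop t (prev :: ps) = (prev :: s) :: r →
      pvLoopA t segs (cur ++ [prev]) ps = segs ++ (cur ++ prev :: s) :: r := by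
  induction ps with
  | nil =>
    intro segs cur prev s r h
    rw [pvChop] at h
    simp [pvChop] at h
    obtain ⟨hs, hr⟩ := h
    subst hs; subst hr
    simp [pvLoopA]
  | cons p ps ih =>
    intro segs cur prev s r h
    obtain ⟨s', r', h'⟩ := pvChop_cons t p ps
    rw [pvChop, h'] at h
    replace h : (if |prev.1 - p.1| ≤ t then (prev :: p :: s') :: r'
        else [prev] :: (p :: s') :: r') = (prev :: s) :: r := h
    rw [pvLoopA]
    simp only [List.append_eq_nil_iff, List.cons_ne_nil, and_false, if_false,
      List.getLast?_concat]
    by_cases hc : |p.1 - prev.1| > t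
    · have hc' : ¬ |prev.1 - p.1| ≤ t := by rw [abs_sub_comm]; omega
      rw [if_neg hc'] at h
      injection h with h1 h2
      injection h1 with _ h1'
      subst h2; subst h1'
      rw [if_pos hc]
      have := ih (segs ++ [cur ++ [prev]]) [] p s' r' h'
      simp only [List.nil_append] at this
      rw [this]
      simp
    · have hc' : |prev.1 - p.1| ≤ t := by rw [abs_sub_comm]; omega
      rw [if_pos hc'] at h
      injection h with h1 h2
      injection h1 with _ h1'
      subst h2; subst h1'
      rw [if_neg hc]
      have := ih segs (cur ++ [prev]) p s' r' h'
      rw [List.append_assoc] at this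
      simpa using this

-- port A computes pvChop
theorem splitA_eq_chop (pts : List (Int × Int)) (width : Int) :
    split_at_seam_py pts width = pvChop (PySem.Int.floordiv width 2) pts := by
  rw [split_at_seam_py]
  cases pts with
  | nil => simp [pvLoopA, pvChop]
  | cons p ps =>
    obtain ⟨s, r, h⟩ := pvChop_cons (PySem.Int.floordiv width 2) p ps
    have := pvLoopA_chop (PySem.Int.floordiv width 2) ps [] [] p s r h
    simp only [List.nil_append] at this
    rw [pvLoopA, if_pos rfl, List.nil_append, this, h]

-- the break positions of B, as natural numbers (relative to the start of the list)
def pvGaps (t : Int) : List (Int × Int) → List Nat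
  | p :: q :: ps => (if |q.1 - p.1| > t then [1] else []) ++ (pvGaps t (q :: ps)).map (· + 1)
  | _ => []

-- the slicing phase of B, as drop/take at natural boundaries (n = length of l)
def pvSeg (l : List (Int × Int)) (n : Nat) : Nat → List Nat → List (List (Int × Int))
  | a, [] => [(l.drop a).take (n - a)]
  | a, b :: bs => (l.drop a).take (b - a) :: pvSeg l n b bs

-- B's comprehension over enumerate(zip(pts, pts[1:])) computes pvGaps, shifted by the start index
theorem pvBreaks_eq_gaps (t : Int) :
    ∀ (l : List (Int × Int)) (s : Int),
      (PySem.List.enumerate (l.zip l.tail) s).filterMap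
          (fun ipq => if |ipq.2.2.1 - ipq.2.1.1| > t then some (ipq.1 + 1) else none)
        = (pvGaps t l).map (fun k : Nat => s + (k : Int)) := by
  intro l
  induction l with
  | nil => intro s; simp [pvGaps]
  | cons p l ih =>
    intro s
    cases l with
    | nil => simp [pvGaps]
    | cons q ps =>
      have hz : (p :: q :: ps).zip (p :: q :: ps).tail = (p, q) :: ((q :: ps).zip (q :: ps).tail) := by
        simp [List.zip]
      have hmap : ((pvGaps t (q :: ps)).map (· + 1)).map (fun k : Nat => s + (k : Int))
          = (pvGaps t (q :: ps)).map (fun k : Nat => (s + 1) + (k : Int)) := by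
        rw [List.map_map]
        apply List.map_congr_left; intro k _
        simp only [Function.comp_apply]; push_cast; ring
      rw [hz, PySem.List.enumerate_cons, List.filterMap_cons, ih (s + 1), pvGaps]
      by_cases hc : |q.1 - p.1| > t
      · rw [if_pos hc, if_pos hc]
        simp only [List.singleton_append, List.map_cons, hmap]
        norm_num
      · rw [if_neg hc, if_neg hc]
        simp only [List.nil_append, hmap]

-- consecutive pairs of (a :: bs ++ [n]) mapped through g equal the pvSeg-shaped recursion
theorem pvZipPairs (l : List (Int × Int)) (n : Nat) :
    ∀ (bs : List Nat) (a : Nat),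
      (((a :: (bs ++ [n])).zip (bs ++ [n])).map
          (fun ab => (l.drop ab.1).take (ab.2 - ab.1)))
        = pvSeg l n a bs := by
  intro bs
  induction bs with
  | nil => intro a; simp [pvSeg]
  | cons b bs ih => intro a; simp only [List.cons_append, List.zip_cons_cons, List.map_cons, pvSeg, ih]

-- shifting the list and all boundaries by one leaves the segments unchanged
theorem pvSeg_shift (p : Int × Int) (l : List (Int × Int)) :
    ∀ (bs : List Nat) (a : Nat),
      pvSeg (p :: l) (l.length + 1) (a + 1) (bs.map (· + 1)) = pvSeg l l.length a bs := by
  intro bs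
  induction bs with
  | nil => intro a; simp [pvSeg, Nat.succ_sub_succ]
  | cons b bs ih =>
    intro a
    simp only [List.map_cons, pvSeg, List.drop_succ_cons, Nat.succ_sub_succ, ih]

-- shift lemma restated in the simp-normal length form used at the call sites
theorem pvSeg_shift' (p q : Int × Int) (ps : List (Int × Int)) (bs : List Nat) (a : Nat) :
    pvSeg (p :: q :: ps) (ps.length + 1 + 1) (a + 1) (bs.map (· + 1))
      = pvSeg (q :: ps) (ps.length + 1) a bs := by
  simpa using pvSeg_shift p (q :: ps) bs a

-- the slicing phase computes pvChop on a nonempty list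
theorem pvSeg_gaps_eq_chop (t : Int) :
    ∀ (p : Int × Int) (ps : List (Int × Int)),
      pvSeg (p :: ps) (ps.length + 1) 0 (pvGaps t (p :: ps)) = pvChop t (p :: ps) := by
  intro p ps
  induction ps generalizing p with
  | nil => simp [pvGaps, pvSeg, pvChop]
  | cons q ps ih =>
    obtain ⟨s, r, h⟩ := pvChop_cons t q ps
    have hchop : pvChop t (p :: q :: ps) =
        if |p.1 - q.1| ≤ t then (p :: q :: s) :: r else [p] :: (q :: s) :: r := by
      rw [pvChop, h]
    have hrec := ih q
    rw [h] at hrec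
    rw [pvGaps, hchop]
    by_cases hc : |q.1 - p.1| > t
    · have hc' : ¬ |p.1 - q.1| ≤ t := by rw [abs_sub_comm]; omega
      rw [if_pos hc, if_neg hc']
      show pvSeg (p :: q :: ps) ((q :: ps).length + 1) 0
          (1 :: (pvGaps t (q :: ps)).map (· + 1)) = [p] :: (q :: s) :: r
      rw [pvSeg]
      simp only [List.length_cons, List.drop_zero, Nat.sub_zero, List.take_succ_cons,
        List.take_zero]
      rw [show (1 : Nat) = 0 + 1 from rfl, pvSeg_shift' p q ps (pvGaps t (q :: ps)) 0,
        hrec]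
    · have hc' : |p.1 - q.1| ≤ t := by rw [abs_sub_comm]; omega
      rw [if_neg hc, if_pos hc']
      show pvSeg (p :: q :: ps) ((q :: ps).length + 1) 0
          ((pvGaps t (q :: ps)).map (· + 1)) = (p :: q :: s) :: r
      cases hg : pvGaps t (q :: ps) with
      | nil =>
        rw [hg] at hrec
        simp only [pvSeg, List.map_nil, List.length_cons, List.drop_zero, Nat.sub_zero,
          List.take_succ_cons, List.take_length] at hrec ⊢
        injection hrec with h1 h2
        injection h1 with _ h1'
        rw [h1', h2]
      | cons b bs =>
        rw [hg] at hrec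
        rw [pvSeg] at hrec
        simp only [List.drop_zero, Nat.sub_zero] at hrec
        injection hrec with h1 h2
        rw [List.map_cons, pvSeg]
        simp only [List.length_cons, List.drop_zero, Nat.sub_zero, List.take_succ_cons]
        rw [h1, pvSeg_shift' p q ps bs b, h2]

-- port B computes pvChop too
theorem splitB_eq_chop (pts : List (Int × Int)) (width : Int) :
    split_at_seam_py_alt pts width = pvChop (PySem.Int.floordiv width 2) pts := by
  cases pts with
  | nil => simp [split_at_seam_py_alt, pvChop]
  | cons p ps =>
    set t := PySem.Int.floordiv width 2 with ht
    rw [split_at_seam_py_alt, if_neg (by simp)]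
    simp only [PySem.List.slice_from_one]
    rw [pvBreaks_eq_gaps t (p :: ps) 0]
    simp only [zero_add]
    -- the Int bounds list is the Nat bounds list mapped through the cast
    have hcast : ([(0 : Int)] ++ (pvGaps t (p :: ps)).map (fun k : Nat => (k : Int)) ++ [((p :: ps).length : Int)])
        = ((0 :: (pvGaps t (p :: ps) ++ [(p :: ps).length])).map (fun k : Nat => (k : Int))) := by
      simp
    rw [hcast]
    have htail : ((0 :: (pvGaps t (p :: ps) ++ [(p :: ps).length])).map (fun k : Nat => (k : Int))).tail
        = ((pvGaps t (p :: ps) ++ [(p :: ps).length]).map (fun k : Nat => (k : Int))) := by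
      simp
    rw [htail, List.zip_map, List.map_map]
    have hslice : ∀ ab : Nat × Nat,
        PySem.List.slice (p :: ps) (some ((ab.1 : Nat) : Int)) (some ((ab.2 : Nat) : Int))
          = ((p :: ps).drop ab.1).take (ab.2 - ab.1) := by
      intro ab; exact PySem.List.slice_natCast (p :: ps) ab.1 ab.2
    calc ((0 :: (pvGaps t (p :: ps) ++ [(p :: ps).length])).zip
            (pvGaps t (p :: ps) ++ [(p :: ps).length])).map
          ((fun ab => PySem.List.slice (p :: ps) (some ab.1) (some ab.2)) ∘
            Prod.map (fun k : Nat => (k : Int)) (fun k : Nat => (k : Int)))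
        = ((0 :: (pvGaps t (p :: ps) ++ [(p :: ps).length])).zip
            (pvGaps t (p :: ps) ++ [(p :: ps).length])).map
          (fun ab => ((p :: ps).drop ab.1).take (ab.2 - ab.1)) := by
          apply List.map_congr_left; intro ab _
          simp only [Function.comp, Prod.map]
          exact hslice (ab.1, ab.2)
      _ = pvSeg (p :: ps) (p :: ps).length 0 (pvGaps t (p :: ps)) :=
          pvZipPairs (p :: ps) (p :: ps).length (pvGaps t (p :: ps)) 0
      _ = pvChop t (p :: ps) := by
          rw [show (p :: ps).length = ps.length + 1 from by simp]
          exact pvSeg_gaps_eq_chop t p ps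

-- ===== VERDICT (by name: the statement is the Claim_ definition above) =====
theorem split_at_seam_py_spec : Claim_equal_split_at_seam_py := by
  intro pts width _
  unfold Spec_split_at_seam_py
  rw [splitA_eq_chop, splitB_eq_chop]
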